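-- pv_equiv track=rewrite | github.com/marcosconci1/julia-mandelbrot | juliams/visualization/charts.py | _find_continuous_segments
-- ===== SOURCE A (Python) =====
-- def _find_continuous_segments(mask):
--     """Find start and end indices of continuous True segments in a boolean mask."""
--     segments = []
--     in_segment = False
--     start = None
--
--     for i, val in enumerate(mask):
--         if val and not in_segment:
--             start = i
--             in_segment = True
--         elif not val and in_segment:
--             segments.append((start, i-1))
--             in_segment = False
--
--     if in_segment:
--         segments.append((start, len(mask)-1))
--
--     return segments
-- ===== SOURCE B (Python) =====
-- from itertools import groupby
--
--
-- def _find_continuous_segments(mask):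
--     """Find start and end indices of continuous True segments in a boolean mask."""
--     segments = []
--     idx = 0
--     for val, group in groupby(bool(v) for v in mask):
--         length = sum(1 for _ in group)
--         if val:
--             segments.append((idx, idx + length - 1))
--         idx += length
--     return segments
-- ===== Notes on version B (the rewrite author's own statement) =====
-- stated objective: idiomatic
-- what changed: Replaces the in_segment flag machine with edge detection by an itertools.groupby traversal over maximal runs, emitting one segment per True run from a running index.
import Mathlib
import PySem

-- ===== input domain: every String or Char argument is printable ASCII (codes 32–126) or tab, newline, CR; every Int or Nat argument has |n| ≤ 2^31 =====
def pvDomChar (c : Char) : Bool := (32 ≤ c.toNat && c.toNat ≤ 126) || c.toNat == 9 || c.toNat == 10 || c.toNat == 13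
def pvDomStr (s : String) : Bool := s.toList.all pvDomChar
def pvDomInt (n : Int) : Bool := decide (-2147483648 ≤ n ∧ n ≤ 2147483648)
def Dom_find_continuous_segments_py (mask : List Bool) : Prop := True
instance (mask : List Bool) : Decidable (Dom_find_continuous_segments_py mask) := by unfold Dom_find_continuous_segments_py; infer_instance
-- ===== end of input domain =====

-- B replaces A's in_segment-flag edge detection with a traversal over maximal runs (groupby style); idiomatic, same cost.

-- ===== PORT A =====
-- loop body of A's for-loop (state = (segments, in_segment, start)); Python's start is None
-- until the first True and is only ever read while in_segment, so it is carried as an Int (init 0)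
def fcsStep (s : List (Int × Int) × Bool × Int) (p : Int × Bool) : List (Int × Int) × Bool × Int :=
  if p.2 && !s.2.1 then (s.1, true, p.1)
  else if !p.2 && s.2.1 then (s.1 ++ [(s.2.2, p.1 - 1)], false, s.2.2)
  else s

def find_continuous_segments_py (mask : List Bool) : List (Int × Int) :=
  let st := (PySem.List.enumerate mask).foldl fcsStep ([], false, 0)
  if st.2.1 then st.1 ++ [(st.2.2, (mask.length : Int) - 1)] else st.1

-- ===== PORT B =====
-- one groupby step: consume the maximal run equal to the head (length = 1 + run, inlined),
-- emit a segment exactly when the run value is True, then advance the index by the run length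
def fcsRuns (idx : Int) : List Bool → List (Int × Int)
  | [] => []
  | b :: rest =>
    (if b then [(idx, idx + (1 + ((rest.takeWhile (· == b)).length : Int)) - 1)] else []) ++
      fcsRuns (idx + (1 + ((rest.takeWhile (· == b)).length : Int))) (rest.dropWhile (· == b))
termination_by l => l.length
decreasing_by
  simp only [List.length_cons]
  exact Nat.lt_succ_of_le (rest.length_dropWhile_le _)

def find_continuous_segments_py_alt (mask : List Bool) : List (Int × Int) :=
  fcsRuns 0 mask

-- ===== PRECONDITION & SPEC =====
def Spec_find_continuous_segments_py (mask : List Bool) (out : List (Int × Int)) : Prop := out = find_continuous_segments_py_alt mask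
instance (mask : List Bool) (out : List (Int × Int)) : Decidable (Spec_find_continuous_segments_py mask out) := by unfold Spec_find_continuous_segments_py; infer_instance

-- ===== CLAIM (what is proved, stated in full; the proofs are below) =====
def Claim_equal_find_continuous_segments_py : Prop := ∀ (mask : List Bool), Dom_find_continuous_segments_py mask → Spec_find_continuous_segments_py mask (find_continuous_segments_py mask)

-- ===== LEMMAS AND PROOFS =====

-- A's finalization step (the trailing `if in_segment` of A), abstracted over the end index used
def fcsFin (n : Int) (s : List (Int × Int) × Bool × Int) : List (Int × Int) :=
  if s.2.1 then s.1 ++ [(s.2.2, n - 1)] else s.1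

-- skipping one False agrees with B skipping the whole False run at once
lemma fcsRuns_false (k : Int) (rest : List Bool) :
    fcsRuns k (false :: rest) = fcsRuns (k + 1) rest := by
  cases rest with
  | nil => simp [fcsRuns]
  | cons b r =>
    cases b with
    | false =>
      simp only [fcsRuns]
      norm_num
      ring_nf
    | true =>
      simp [fcsRuns]

-- unfolding B on a True head
lemma fcsRuns_true (k : Int) (rest : List Bool) :
    fcsRuns k (true :: rest) =
      (k, k + ((rest.takeWhile (· == true)).length : Int)) ::
        fcsRuns (k + 1 + ((rest.takeWhile (· == true)).length : Int)) (rest.dropWhile (· == true)) := by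
  simp only [fcsRuns]
  norm_num
  ring_nf
  exact ⟨trivial, trivial⟩

-- main loop invariant: A's fold over the suffix l (indices from k), finalized with end index
-- k + |l|, equals the emitted segments plus B's run scan of l; the second conjunct is the
-- open-segment (in_segment = true, start = s0) state.
lemma fcs_loop (l : List Bool) : ∀ (k : Int) (segs : List (Int × Int)) (st s0 : Int),
    fcsFin (k + l.length) ((PySem.List.enumerate l k).foldl fcsStep (segs, false, st))
      = segs ++ fcsRuns k l
  ∧ fcsFin (k + l.length) ((PySem.List.enumerate l k).foldl fcsStep (segs, true, s0))
      = segs ++ (s0, k + ((l.takeWhile (· == true)).length : Int) - 1)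
          :: fcsRuns (k + ((l.takeWhile (· == true)).length : Int)) (l.dropWhile (· == true)) := by
  induction l with
  | nil =>
    intro k segs st s0
    refine ⟨by simp [PySem.List.enumerate, fcsFin, fcsRuns], ?_⟩
    simp [PySem.List.enumerate, fcsFin, fcsRuns]
  | cons b rest ih =>
    intro k segs st s0
    have elen : ∀ c : Bool, (k + (((c :: rest).length : Nat) : Int)) = (k + 1) + (rest.length : Int) := by
      intro c; simp only [List.length_cons]; push_cast; ring
    cases b with
    | false =>
      constructor
      · rw [PySem.List.enumerate_cons, List.foldl_cons,
            show fcsStep (segs, false, st) (k, false) = (segs, false, st) from rfl,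
            elen false, (ih (k + 1) segs st s0).1, fcsRuns_false]
      · rw [PySem.List.enumerate_cons, List.foldl_cons,
            show fcsStep (segs, true, s0) (k, false) = (segs ++ [(s0, k - 1)], false, s0) from rfl,
            elen false, (ih (k + 1) (segs ++ [(s0, k - 1)]) s0 s0).1,
            show List.takeWhile (· == true) (false :: rest) = [] from rfl,
            show List.dropWhile (· == true) (false :: rest) = false :: rest from rfl]
        simp [fcsRuns_false]
    | true =>
      constructor
      · rw [PySem.List.enumerate_cons, List.foldl_cons,
            show fcsStep (segs, false, st) (k, true) = (segs, true, k) from rfl,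
            elen true, (ih (k + 1) segs st k).2, fcsRuns_true]
        ring_nf
      · rw [PySem.List.enumerate_cons, List.foldl_cons,
            show fcsStep (segs, true, s0) (k, true) = (segs, true, s0) from rfl,
            elen true, (ih (k + 1) segs s0 s0).2,
            show List.takeWhile (· == true) (true :: rest) = true :: rest.takeWhile (· == true) from rfl,
            show List.dropWhile (· == true) (true :: rest) = rest.dropWhile (· == true) from rfl]
        simp only [List.length_cons]
        push_cast
        ring_nf

-- ===== VERDICT (by name: the statement is the Claim_ definition above) =====
theorem find_continuous_segments_py_spec : Claim_equal_find_continuous_segments_py := by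
  intro mask _
  unfold Spec_find_continuous_segments_py
  have h := (fcs_loop mask 0 [] 0 0).1
  simp only [zero_add, List.nil_append] at h
  exact h
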